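-- pv_equiv track=rewrite | github.com/LukaSveigl/ULFRI-undergrad-coursework | year1/semester-1/programming-1 (P1)/Srečanja/testi.py | tocke_razdalja
-- ===== SOURCE A (Python) =====
-- def odsek(x, y, smer, razdalja):
--     odseki = []
--     if smer == ">":
--         for r in range(razdalja + 1):
--             odseki.append(tuple([x + r, y]))
--     elif smer == "^":
--         for r in range(razdalja + 1):
--             odseki.append(tuple([x, y + r]))
--     elif smer == "<":
--         for r in range(razdalja + 1):
--             odseki.append(tuple([x - r, y]))
--     else:
--         for r in range(razdalja + 1):
--             odseki.append(tuple([x, y - r]))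
--     return odseki
--
-- def tocke_razdalja(st):
--     points = [(0, (0, 0))]
--     for s in st:
--         x, y = points[-1][-1]
--         smer, razdalja = s
--         ods = odsek(x, y, smer, razdalja)[1:]
--         for o in ods:
--             points.append((points[-1][0] + 1, o))
--     return points
-- ===== SOURCE B (Python) =====
-- DELTA = {">": (1, 0), "^": (0, 1), "<": (-1, 0)}
--
-- def tocke_razdalja(st):
--     # Pass 1: compute each segment's starting counter/position by prefix sums.
--     starts = []
--     n = x = y = 0
--     for smer, razdalja in st:
--         dx, dy = DELTA.get(smer, (0, -1))
--         starts.append((n, x, y, dx, dy, razdalja))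
--         steps = max(razdalja, 0)
--         n += steps
--         x += steps * dx
--         y += steps * dy
--     # Pass 2: emit each segment wholesale: pair up arithmetic coordinate ranges,
--     # then number the coordinates with a range of counters.
--     out = [(0, (0, 0))]
--     for n0, x0, y0, dx, dy, r in starts:
--         steps = max(r, 0)
--         xs = range(x0 + dx, x0 + steps * dx + dx, dx) if dx else [x0] * steps
--         ys = range(y0 + dy, y0 + steps * dy + dy, dy) if dy else [y0] * steps
--         coords = list(zip(xs, ys))
--         out.extend(zip(range(n0 + 1, n0 + steps + 1), coords))
--     return out
-- ===== Notes on version B (the rewrite author's own statement) =====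
-- stated objective: alternative
-- what changed: Replaces A's single incremental walk (build each full segment via the odsek helper, slice off its head, renumber from points[-1]) with two staged passes: a prefix-sum pass computing each segment's starting counter and position, then an emission pass that materialises each segment wholesale by zipping a counter range with arithmetic coordinate ranges, with no per-point mutation.
import Mathlib
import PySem

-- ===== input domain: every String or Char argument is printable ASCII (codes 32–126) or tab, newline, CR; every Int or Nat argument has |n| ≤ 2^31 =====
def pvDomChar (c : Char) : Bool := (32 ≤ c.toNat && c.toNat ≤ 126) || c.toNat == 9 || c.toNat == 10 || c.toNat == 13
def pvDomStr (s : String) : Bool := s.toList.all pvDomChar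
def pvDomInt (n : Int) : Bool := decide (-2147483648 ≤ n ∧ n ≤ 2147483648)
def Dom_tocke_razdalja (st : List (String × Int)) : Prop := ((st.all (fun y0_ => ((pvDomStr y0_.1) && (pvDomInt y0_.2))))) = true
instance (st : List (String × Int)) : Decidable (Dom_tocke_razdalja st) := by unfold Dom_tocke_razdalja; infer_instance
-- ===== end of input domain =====

-- B replaces A's single incremental walk (build each segment with odsek, slice its head off,
-- renumber from points[-1]) with two staged passes: a prefix-sum pass computing each segment's
-- starting counter/position, then an emission pass producing every point in closed form.

-- ===== PORT A =====
def odsek (x y : Int) (smer : String) (razdalja : Int) : List (Int × Int) :=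
  if smer = ">" then
    (PySem.List.pyRange 0 (razdalja + 1) 1).foldl (fun odseki r => odseki ++ [(x + r, y)]) []
  else if smer = "^" then
    (PySem.List.pyRange 0 (razdalja + 1) 1).foldl (fun odseki r => odseki ++ [(x, y + r)]) []
  else if smer = "<" then
    (PySem.List.pyRange 0 (razdalja + 1) 1).foldl (fun odseki r => odseki ++ [(x - r, y)]) []
  else
    (PySem.List.pyRange 0 (razdalja + 1) 1).foldl (fun odseki r => odseki ++ [(x, y - r)]) []

def tocke_razdalja (st : List (String × Int)) : List (Int × (Int × Int)) :=
  st.foldl (fun points s =>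
      let xy := (PySem.List.pyGetD points (-1) (0, (0, 0))).2
      let ods := PySem.List.slice (odsek xy.1 xy.2 s.1 s.2) (some 1) none
      ods.foldl (fun points o =>
        points ++ [((PySem.List.pyGetD points (-1) (0, (0, 0))).1 + 1, o)]) points)
    [(0, (0, 0))]

-- ===== PORT B =====
def pvDELTA : PySem.Dict String (Int × Int) :=
  PySem.Dict.ofList [(">", (1, 0)), ("^", (0, 1)), ("<", (-1, 0))]

-- the start record of one segment: (n0, x0, y0, dx, dy, r) as appended to `starts`
structure Start where
  n0 : Int
  x0 : Int
  y0 : Int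
  dx : Int
  dy : Int
  r : Int
deriving DecidableEq, Repr

def tocke_razdalja_alt (st : List (String × Int)) : List (Int × (Int × Int)) :=
  let p := st.foldl (fun (a : List Start × Int × Int × Int) s =>
      let d := PySem.Dict.getD pvDELTA s.1 (0, -1)
      let steps := max s.2 0
      (a.1 ++ [⟨a.2.1, a.2.2.1, a.2.2.2, d.1, d.2, s.2⟩],
        a.2.1 + steps, a.2.2.1 + steps * d.1, a.2.2.2 + steps * d.2))
    ([], 0, 0, 0)
  p.1.foldl (fun out t =>
      let steps := max t.r 0
      let xs := if t.dx ≠ 0 then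
          PySem.List.pyRange (t.x0 + t.dx) (t.x0 + steps * t.dx + t.dx) t.dx
        else List.replicate steps.toNat t.x0
      let ys := if t.dy ≠ 0 then
          PySem.List.pyRange (t.y0 + t.dy) (t.y0 + steps * t.dy + t.dy) t.dy
        else List.replicate steps.toNat t.y0
      let coords := xs.zip ys
      out ++ (PySem.List.pyRange (t.n0 + 1) (t.n0 + steps + 1) 1).zip coords)
    [(0, (0, 0))]

-- ===== PRECONDITION & SPEC =====
def Spec_tocke_razdalja (st : List (String × Int)) (out : List (Int × (Int × Int))) : Prop := out = tocke_razdalja_alt st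
instance (st : List (String × Int)) (out : List (Int × (Int × Int))) : Decidable (Spec_tocke_razdalja st out) := by unfold Spec_tocke_razdalja; infer_instance

-- ===== CLAIM (what is proved, stated in full; the proofs are below) =====
def Claim_equal_tocke_razdalja : Prop := ∀ (st : List (String × Int)), Dom_tocke_razdalja st → Spec_tocke_razdalja st (tocke_razdalja st)

-- ===== LEMMAS AND PROOFS =====

-- the direction → delta table, as one value (shared characterisation of both programs' dispatch)
def deltaOf (smer : String) : Int × Int :=
  if smer = ">" then (1, 0) else if smer = "^" then (0, 1) else if smer = "<" then (-1, 0) else (0, -1)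

lemma getD_pvDELTA (smer : String) : PySem.Dict.getD pvDELTA smer (0, -1) = deltaOf smer := by
  by_cases h1 : smer = ">"
  · subst h1; rfl
  by_cases h2 : smer = "^"
  · subst h2; rfl
  by_cases h3 : smer = "<"
  · subst h3; rfl
  simp [pvDELTA, deltaOf, PySem.Dict.ofList, PySem.Dict.update, PySem.Dict.getD_insert,
    PySem.Dict.getD_empty, h1, h2, h3]

-- the coordinates a segment visits: (x,y) stepped m times by (dx,dy), start point excluded
def coordWalk (x y dx dy : Int) : Nat → List (Int × Int)
  | 0 => []
  | m + 1 => (x + dx, y + dy) :: coordWalk (x + dx) (y + dy) dx dy m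

-- consecutive numbering of a list of points, starting at n
def numberFrom (n : Int) : List (Int × Int) → List (Int × (Int × Int))
  | [] => []
  | p :: ps => (n, p) :: numberFrom (n + 1) ps

-- the whole tail of the path from segment start (n, x, y): the common target of both programs
def segs : List (String × Int) → Int → Int → Int → List (Int × (Int × Int))
  | [], _, _, _ => []
  | (smer, r) :: rest, n, x, y =>
    numberFrom (n + 1) (coordWalk x y (deltaOf smer).1 (deltaOf smer).2 r.toNat) ++
      segs rest (n + r.toNat) (x + r.toNat * (deltaOf smer).1) (y + r.toNat * (deltaOf smer).2)

lemma map_range_coordWalk (dx dy : Int) :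
    ∀ (m : Nat) (x y : Int),
      (List.range m).map (fun (k : Nat) => (x + ((k : Int) + 1) * dx, y + ((k : Int) + 1) * dy)) =
        coordWalk x y dx dy m := by
  intro m
  induction m with
  | zero => intro x y; simp [coordWalk]
  | succ m ih =>
    intro x y
    rw [List.range_succ_eq_map, List.map_cons, List.map_map]
    show _ :: _ = _ :: _
    congr 1
    · simp only [Prod.mk.injEq]; constructor <;> push_cast <;> ring
    · rw [← ih (x + dx) (y + dy)]
      apply List.map_congr_left
      intro k _
      simp only [Function.comp, Prod.mk.injEq]
      constructor <;> push_cast <;> ring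

lemma odsek_eq (x y : Int) (smer : String) (r : Int) :
    odsek x y smer r =
      (PySem.List.pyRange 0 (r + 1) 1).map
        (fun t => (x + t * (deltaOf smer).1, y + t * (deltaOf smer).2)) := by
  unfold odsek deltaOf
  split_ifs <;>
    rw [PySem.List.foldl_append_singleton_eq_map] <;>
    · simp only [List.nil_append]
      apply List.map_congr_left
      intro t _
      simp only [Prod.mk.injEq]
      constructor <;> ring

lemma tail_seg (x y : Int) (smer : String) (r : Int) :
    PySem.List.slice (odsek x y smer r) (some 1) none =
      coordWalk x y (deltaOf smer).1 (deltaOf smer).2 r.toNat := by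
  rw [PySem.List.slice_from_one, odsek_eq]
  by_cases h : r + 1 ≤ 0
  · rw [PySem.List.pyRange_one_eq_nil h]
    have : r.toNat = 0 := by omega
    simp [this, coordWalk]
  · rw [PySem.List.pyRange_one_cons (by omega)]
    simp only [List.map_cons, List.tail_cons]
    rw [PySem.List.pyRange_one]
    have hlen : (r + 1 - (0 + 1)).toNat = r.toNat := by omega
    rw [hlen, List.map_map, ← map_range_coordWalk]
    apply List.map_congr_left
    intro k _
    simp only [Function.comp, Prod.mk.injEq]
    constructor <;> push_cast <;> ring

lemma innerA (ods : List (Int × Int)) :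
    ∀ (pre : List (Int × (Int × Int))) (n : Int) (p : Int × Int),
      ods.foldl (fun points o =>
          points ++ [((PySem.List.pyGetD points (-1) (0, (0, 0))).1 + 1, o)]) (pre ++ [(n, p)]) =
        (pre ++ [(n, p)]) ++ numberFrom (n + 1) ods := by
  induction ods with
  | nil => intro pre n p; simp [numberFrom]
  | cons o os ih =>
    intro pre n p
    simp only [List.foldl_cons, PySem.List.pyGetD_neg_one_append_singleton]
    have := ih (pre ++ [(n, p)]) (n + 1) o
    simp only [List.append_assoc] at this ⊢
    rw [this]
    simp [numberFrom]

lemma shape (dx dy : Int) :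
    ∀ (m : Nat) (x y n : Int) (pre : List (Int × (Int × Int))),
      ∃ pre', (pre ++ [(n, (x, y))]) ++ numberFrom (n + 1) (coordWalk x y dx dy m) =
        pre' ++ [(n + m, (x + m * dx, y + m * dy))] := by
  intro m
  induction m with
  | zero => intro x y n pre; exact ⟨pre, by simp [coordWalk, numberFrom]⟩
  | succ m ih =>
    intro x y n pre
    obtain ⟨pre', hp⟩ := ih (x + dx) (y + dy) (n + 1) (pre ++ [(n, (x, y))])
    refine ⟨pre', ?_⟩
    simp only [coordWalk, numberFrom, List.append_assoc, List.cons_append,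
      List.nil_append] at hp ⊢
    rw [hp]
    have h1 : n + 1 + (m : Int) = n + ((m + 1 : Nat) : Int) := by push_cast; ring
    have h2 : x + dx + (m : Int) * dx = x + ((m + 1 : Nat) : Int) * dx := by push_cast; ring
    have h3 : y + dy + (m : Int) * dy = y + ((m + 1 : Nat) : Int) * dy := by push_cast; ring
    rw [h1, h2, h3]

-- A's loop, characterised against segs
lemma A_loop :
    ∀ (st : List (String × Int)) (pre : List (Int × (Int × Int))) (n x y : Int),
      st.foldl (fun points s =>
          let xy := (PySem.List.pyGetD points (-1) (0, (0, 0))).2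
          let ods := PySem.List.slice (odsek xy.1 xy.2 s.1 s.2) (some 1) none
          ods.foldl (fun points o =>
            points ++ [((PySem.List.pyGetD points (-1) (0, (0, 0))).1 + 1, o)]) points)
        (pre ++ [(n, (x, y))]) =
      (pre ++ [(n, (x, y))]) ++ segs st n x y := by
  intro st
  induction st with
  | nil => intro pre n x y; simp [segs]
  | cons s rest ih =>
    intro pre n x y
    obtain ⟨smer, r⟩ := s
    simp only [List.foldl_cons, PySem.List.pyGetD_neg_one_append_singleton]
    rw [tail_seg, innerA]
    obtain ⟨pre', hp⟩ := shape (deltaOf smer).1 (deltaOf smer).2 r.toNat x y n pre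
    rw [hp, ih pre' (n + r.toNat) (x + r.toNat * (deltaOf smer).1)
          (y + r.toNat * (deltaOf smer).2), ← hp]
    simp [segs, List.append_assoc]

-- B's pass-1 result, as a recursive function of the segment start state
def startsList : List (String × Int) → Int → Int → Int → List Start
  | [], _, _, _ => []
  | (smer, r) :: rest, n, x, y =>
    ⟨n, x, y, (deltaOf smer).1, (deltaOf smer).2, r⟩ ::
      startsList rest (n + max r 0) (x + max r 0 * (deltaOf smer).1)
        (y + max r 0 * (deltaOf smer).2)

def bStep (a : List Start × Int × Int × Int) (s : String × Int) : List Start × Int × Int × Int :=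
  (a.1 ++ [⟨a.2.1, a.2.2.1, a.2.2.2, (deltaOf s.1).1, (deltaOf s.1).2, s.2⟩],
    a.2.1 + max s.2 0, a.2.2.1 + max s.2 0 * (deltaOf s.1).1, a.2.2.2 + max s.2 0 * (deltaOf s.1).2)

-- the port's step function, with the dict lookup resolved to deltaOf
lemma step_eq :
    (fun (a : List Start × Int × Int × Int) (s : String × Int) =>
        let d := PySem.Dict.getD pvDELTA s.1 (0, -1)
        let steps := max s.2 0
        (a.1 ++ [(⟨a.2.1, a.2.2.1, a.2.2.2, d.1, d.2, s.2⟩ : Start)],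
          a.2.1 + steps, a.2.2.1 + steps * d.1, a.2.2.2 + steps * d.2)) = bStep := by
  funext a s
  simp [bStep, getD_pvDELTA]

lemma B_fold :
    ∀ (st : List (String × Int)) (acc : List Start) (n x y : Int),
      (st.foldl bStep (acc, n, x, y)).1 = acc ++ startsList st n x y := by
  intro st
  induction st with
  | nil => intro acc n x y; simp [startsList]
  | cons s rest ih =>
    intro acc n x y
    obtain ⟨smer, r⟩ := s
    rw [List.foldl_cons, bStep]
    rw [ih]
    simp [startsList]

lemma length_coordWalk (dx dy : Int) :
    ∀ (m : Nat) (x y : Int), (coordWalk x y dx dy m).length = m := by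
  intro m
  induction m with
  | zero => intro x y; simp [coordWalk]
  | succ m ih => intro x y; simp [coordWalk, ih]

-- zipping a counter range onto any coordinate list is consecutive numbering
lemma zip_counter :
    ∀ (cs : List (Int × Int)) (n : Int),
      (PySem.List.pyRange (n + 1) (n + cs.length + 1) 1).zip cs = numberFrom (n + 1) cs := by
  intro cs
  induction cs with
  | nil =>
    intro n
    rw [PySem.List.pyRange_one_eq_nil (by norm_num)]
    simp [numberFrom]
  | cons c cs ih =>
    intro n
    have hlen : (((c :: cs).length : Int)) = ((cs.length : Int)) + 1 := by
      simp [List.length_cons]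
    rw [hlen, PySem.List.pyRange_one_cons (by omega), List.zip_cons_cons, numberFrom]
    have hb : n + (((cs.length : Int)) + 1) + 1 = (n + 1) + ((cs.length : Int)) + 1 := by ring
    rw [hb, ih (n + 1)]

lemma zip_walk_right :
    ∀ (m : Nat) (x y : Int),
      (PySem.List.pyRange (x + 1) (x + m + 1) 1).zip (List.replicate m y) =
        coordWalk x y 1 0 m := by
  intro m
  induction m with
  | zero => intro x y; rw [PySem.List.pyRange_one_eq_nil (by omega)]; simp [coordWalk]
  | succ m ih =>
    intro x y
    rw [PySem.List.pyRange_one_cons (by push_cast; omega), List.replicate_succ,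
      List.zip_cons_cons, coordWalk]
    have hb : x + (↑(m + 1) : Int) + 1 = (x + 1) + (↑m : Int) + 1 := by push_cast; ring
    rw [hb, ih (x + 1) y]
    norm_num

lemma zip_walk_left :
    ∀ (m : Nat) (x y : Int),
      (PySem.List.pyRange (x + -1) (x + m * (-1) + -1) (-1)).zip (List.replicate m y) =
        coordWalk x y (-1) 0 m := by
  intro m
  induction m with
  | zero => intro x y; rw [PySem.List.pyRange_neg_one_eq_nil (by omega)]; simp [coordWalk]
  | succ m ih =>
    intro x y
    rw [PySem.List.pyRange_neg_one_cons (by push_cast; omega), List.replicate_succ,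
      List.zip_cons_cons, coordWalk]
    have hb : x + (↑(m + 1) : Int) * (-1) + -1 = (x + -1) + (↑m : Int) * (-1) + -1 := by
      push_cast; ring
    have hh : x + -1 - 1 = x + -1 + -1 := by ring
    rw [hb, hh, ih (x + -1) y]
    norm_num

lemma zip_walk_up :
    ∀ (m : Nat) (x y : Int),
      (List.replicate m x).zip (PySem.List.pyRange (y + 1) (y + m + 1) 1) =
        coordWalk x y 0 1 m := by
  intro m
  induction m with
  | zero => intro x y; simp [coordWalk]
  | succ m ih =>
    intro x y
    rw [PySem.List.pyRange_one_cons (by push_cast; omega), List.replicate_succ,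
      List.zip_cons_cons, coordWalk]
    have hb : y + (↑(m + 1) : Int) + 1 = (y + 1) + (↑m : Int) + 1 := by push_cast; ring
    rw [hb, ih x (y + 1)]
    norm_num

lemma zip_walk_down :
    ∀ (m : Nat) (x y : Int),
      (List.replicate m x).zip (PySem.List.pyRange (y + -1) (y + m * (-1) + -1) (-1)) =
        coordWalk x y 0 (-1) m := by
  intro m
  induction m with
  | zero => intro x y; simp [coordWalk]
  | succ m ih =>
    intro x y
    rw [PySem.List.pyRange_neg_one_cons (by push_cast; omega), List.replicate_succ,
      List.zip_cons_cons, coordWalk]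
    have hb : y + (↑(m + 1) : Int) * (-1) + -1 = (y + -1) + (↑m : Int) * (-1) + -1 := by
      push_cast; ring
    have hh : y + -1 - 1 = y + -1 + -1 := by ring
    rw [hb, hh, ih x (y + -1)]
    norm_num

-- one segment's emission (the body of B's pass-2 loop) as a function of the start record
def pvEmit (t : Start) : List (Int × (Int × Int)) :=
  (PySem.List.pyRange (t.n0 + 1) (t.n0 + max t.r 0 + 1) 1).zip
    ((if t.dx ≠ 0 then
        PySem.List.pyRange (t.x0 + t.dx) (t.x0 + max t.r 0 * t.dx + t.dx) t.dx
      else List.replicate (max t.r 0).toNat t.x0).zip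
      (if t.dy ≠ 0 then
        PySem.List.pyRange (t.y0 + t.dy) (t.y0 + max t.r 0 * t.dy + t.dy) t.dy
      else List.replicate (max t.r 0).toNat t.y0))

lemma emitStep_eq :
    (fun (out : List (Int × (Int × Int))) (t : Start) =>
      let steps := max t.r 0
      let xs := if t.dx ≠ 0 then
          PySem.List.pyRange (t.x0 + t.dx) (t.x0 + steps * t.dx + t.dx) t.dx
        else List.replicate steps.toNat t.x0
      let ys := if t.dy ≠ 0 then
          PySem.List.pyRange (t.y0 + t.dy) (t.y0 + steps * t.dy + t.dy) t.dy
        else List.replicate steps.toNat t.y0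
      let coords := xs.zip ys
      out ++ (PySem.List.pyRange (t.n0 + 1) (t.n0 + steps + 1) 1).zip coords) =
    fun out t => out ++ pvEmit t := by
  funext out t
  simp [pvEmit]

lemma emit_seg_right (n x y r : Int) :
    pvEmit ⟨n, x, y, 1, 0, r⟩ = numberFrom (n + 1) (coordWalk x y 1 0 r.toNat) := by
  have hmt : (max r 0).toNat = r.toNat := by omega
  have hm : max r 0 = ((r.toNat : Int)) := (Int.ofNat_toNat r).symm
  show (PySem.List.pyRange (n + 1) (n + max r 0 + 1) 1).zip
      ((PySem.List.pyRange (x + 1) (x + max r 0 * 1 + 1) 1).zip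
        (List.replicate (max r 0).toNat y)) = _
  rw [hmt, hm, show x + ((r.toNat : Int)) * 1 + 1 = x + ((r.toNat : Int)) + 1 from by ring,
    zip_walk_right]
  have h := zip_counter (coordWalk x y 1 0 r.toNat) n
  rw [length_coordWalk] at h
  exact h

lemma emit_seg_up (n x y r : Int) :
    pvEmit ⟨n, x, y, 0, 1, r⟩ = numberFrom (n + 1) (coordWalk x y 0 1 r.toNat) := by
  have hmt : (max r 0).toNat = r.toNat := by omega
  have hm : max r 0 = ((r.toNat : Int)) := (Int.ofNat_toNat r).symm
  show (PySem.List.pyRange (n + 1) (n + max r 0 + 1) 1).zip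
      ((List.replicate (max r 0).toNat x).zip
        (PySem.List.pyRange (y + 1) (y + max r 0 * 1 + 1) 1)) = _
  rw [hmt, hm, show y + ((r.toNat : Int)) * 1 + 1 = y + ((r.toNat : Int)) + 1 from by ring,
    zip_walk_up]
  have h := zip_counter (coordWalk x y 0 1 r.toNat) n
  rw [length_coordWalk] at h
  exact h

lemma emit_seg_left (n x y r : Int) :
    pvEmit ⟨n, x, y, -1, 0, r⟩ = numberFrom (n + 1) (coordWalk x y (-1) 0 r.toNat) := by
  have hmt : (max r 0).toNat = r.toNat := by omega
  have hm : max r 0 = ((r.toNat : Int)) := (Int.ofNat_toNat r).symm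
  show (PySem.List.pyRange (n + 1) (n + max r 0 + 1) 1).zip
      ((PySem.List.pyRange (x + -1) (x + max r 0 * -1 + -1) (-1)).zip
        (List.replicate (max r 0).toNat y)) = _
  rw [hmt, hm, zip_walk_left]
  have h := zip_counter (coordWalk x y (-1) 0 r.toNat) n
  rw [length_coordWalk] at h
  exact h

lemma emit_seg_down (n x y r : Int) :
    pvEmit ⟨n, x, y, 0, -1, r⟩ = numberFrom (n + 1) (coordWalk x y 0 (-1) r.toNat) := by
  have hmt : (max r 0).toNat = r.toNat := by omega
  have hm : max r 0 = ((r.toNat : Int)) := (Int.ofNat_toNat r).symm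
  show (PySem.List.pyRange (n + 1) (n + max r 0 + 1) 1).zip
      ((List.replicate (max r 0).toNat x).zip
        (PySem.List.pyRange (y + -1) (y + max r 0 * -1 + -1) (-1))) = _
  rw [hmt, hm, zip_walk_down]
  have h := zip_counter (coordWalk x y 0 (-1) r.toNat) n
  rw [length_coordWalk] at h
  exact h

lemma emit_seg (smer : String) (n x y r : Int) :
    pvEmit ⟨n, x, y, (deltaOf smer).1, (deltaOf smer).2, r⟩ =
      numberFrom (n + 1) (coordWalk x y (deltaOf smer).1 (deltaOf smer).2 r.toNat) := by
  by_cases h1 : smer = ">"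
  · subst h1; exact emit_seg_right n x y r
  by_cases h2 : smer = "^"
  · subst h2
    have hd : deltaOf "^" = ((0 : Int), (1 : Int)) := by
      unfold deltaOf; rw [if_neg (by decide), if_pos rfl]
    rw [hd]
    exact emit_seg_up n x y r
  by_cases h3 : smer = "<"
  · subst h3
    have hd : deltaOf "<" = ((-1 : Int), (0 : Int)) := by
      unfold deltaOf; rw [if_neg (by decide), if_neg (by decide), if_pos rfl]
    rw [hd]
    exact emit_seg_left n x y r
  · have hd : deltaOf smer = ((0 : Int), (-1 : Int)) := by
      unfold deltaOf; rw [if_neg h1, if_neg h2, if_neg h3]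
    rw [hd]
    exact emit_seg_down n x y r

lemma flatMap_starts :
    ∀ (st : List (String × Int)) (n x y : Int),
      (startsList st n x y).flatMap pvEmit = segs st n x y := by
  intro st
  induction st with
  | nil => intro n x y; simp [startsList, segs]
  | cons s rest ih =>
    intro n x y
    obtain ⟨smer, r⟩ := s
    simp only [startsList, segs, List.flatMap_cons]
    rw [emit_seg, ih]
    have hm : ((r.toNat : Int)) = max r 0 := Int.ofNat_toNat r
    rw [hm]

-- ===== VERDICT (by name: the statement is the Claim_ definition above) =====
theorem tocke_razdalja_spec : Claim_equal_tocke_razdalja := by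
  intro st _
  unfold Spec_tocke_razdalja tocke_razdalja tocke_razdalja_alt
  have hA := A_loop st [] 0 0 0
  simp only [List.nil_append] at hA
  rw [hA]
  simp only [step_eq]
  rw [B_fold st [] 0 0 0, List.nil_append]
  rw [emitStep_eq, PySem.List.foldl_append_eq_flatMap, flatMap_starts]
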